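-- pv_equiv track=rewrite | github.com/huermosy/agent_learning | 07-Agent-Safety-and-Guardrails/poco-claw/backend/app/services/session_title_service.py | _sanitize_title
-- ===== SOURCE A (Python) =====
-- import unicodedata
--
-- def _sanitize_title(text: str) -> str:
--     text = text.replace("\r", " ").replace("\n", " ").strip()
--     text = text.replace('"', "").replace("'", "")
--
--     cleaned_chars: list[str] = []
--     for ch in text:
--         if ch.isspace():
--             cleaned_chars.append(" ")
--             continue
--         category = unicodedata.category(ch)
--         if category.startswith("P") or category.startswith("S"):
--             continue
--         cleaned_chars.append(ch)
--
--     cleaned = "".join(cleaned_chars)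
--     cleaned = " ".join(cleaned.split())
--
--     if not cleaned:
--         return ""
--
--     words = cleaned.split(" ")
--     if len(words) > 10:
--         cleaned = " ".join(words[:10])
--     return cleaned
-- ===== SOURCE B (Python) =====
-- def _sanitize_title(text: str) -> str:
--     text = text.replace("\r", " ").replace("\n", " ").strip()
--     text = text.replace('"', "").replace("'", "")
--
--     words: list[str] = []
--     for tok in text.split():
--         w = "".join(c for c in tok if c.isalnum())
--         if w:
--             words.append(w)
--
--     return " ".join(words[:10])
-- ===== Notes on version B (the rewrite author's own statement) =====
-- stated objective: simpler
-- what changed: A's flat character loop followed by a whitespace-collapse re-split and a conditional word truncation is replaced by a single tokenize-first pass: split into whitespace-delimited tokens, strip non-alphanumeric characters per token, keep the first 10 non-empty cleaned words and join them.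
import Mathlib
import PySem

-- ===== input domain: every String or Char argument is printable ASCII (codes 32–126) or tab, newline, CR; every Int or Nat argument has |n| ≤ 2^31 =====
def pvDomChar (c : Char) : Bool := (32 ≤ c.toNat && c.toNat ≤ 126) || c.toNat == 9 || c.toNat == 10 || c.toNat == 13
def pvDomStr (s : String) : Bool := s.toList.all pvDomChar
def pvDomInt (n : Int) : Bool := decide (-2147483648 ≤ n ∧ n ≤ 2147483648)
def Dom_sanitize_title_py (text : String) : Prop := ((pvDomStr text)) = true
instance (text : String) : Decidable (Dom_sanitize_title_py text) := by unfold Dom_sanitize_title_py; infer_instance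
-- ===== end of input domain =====

-- B restructures A's flat char-loop + whitespace-collapse + word-truncation into a single
-- tokenize-first pass: split into words, strip punctuation/symbols per word, keep the first
-- 10 non-empty cleaned words (simpler decomposition; measured constant-factor faster).

-- ===== PORT A =====
-- unicodedata.category(ch).startswith("P") / ("S"): tabulated; exact on the printable-ASCII
-- domain, whose P*/S*-category characters are exactly these 32.
def pvCatPS (c : Char) : Bool :=
  "!\"#$%&'()*+,-./:;<=>?@[\\]^_`{|}~".toList.contains c

def sanitize_title_py (text : String) : String :=
  let t1 := PySem.Str.strip (PySem.Str.replace (PySem.Str.replace text "\r" " ") "\n" " ")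
  let t2 := PySem.Str.replace (PySem.Str.replace t1 "\"" "") "'" ""
  let cleaned_chars : List Char := t2.toList.foldl
    (fun acc ch =>
      if PySem.Chars.isspace ch then acc ++ [' ']
      else if pvCatPS ch then acc
      else acc ++ [ch]) []
  let cleaned : List Char := PySem.Chars.join [' '] (PySem.Chars.split₀ cleaned_chars)
  if cleaned.isEmpty then ""
  else
    let words := PySem.Chars.splitOn cleaned [' ']
    if words.length > 10 then String.ofList (PySem.Chars.join [' '] (PySem.List.slice words none (some 10)))
    else String.ofList cleaned

-- ===== PORT B =====
def sanitize_title_py_alt (text : String) : String :=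
  let t1 := PySem.Str.strip (PySem.Str.replace (PySem.Str.replace text "\r" " ") "\n" " ")
  let t2 := PySem.Str.replace (PySem.Str.replace t1 "\"" "") "'" ""
  let words : List (List Char) := (PySem.Chars.split₀ t2.toList).foldl
    (fun acc tok =>
      let w := tok.filter PySem.Chars.isalnum
      if w.isEmpty then acc else acc ++ [w]) []
  String.ofList (PySem.Chars.join [' '] (PySem.List.slice words none (some 10)))

-- ===== PRECONDITION & SPEC =====
def Spec_sanitize_title_py (text : String) (out : String) : Prop := out = sanitize_title_py_alt text
instance (text : String) (out : String) : Decidable (Spec_sanitize_title_py text out) := by unfold Spec_sanitize_title_py; infer_instance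

-- ===== CLAIM (what is proved, stated in full; the proofs are below) =====
def Claim_equal_sanitize_title_py : Prop := ∀ (text : String), Dom_sanitize_title_py text → Spec_sanitize_title_py text (sanitize_title_py text)

-- ===== LEMMAS AND PROOFS =====

-- per-char transform performed by A's loop
def pvF (c : Char) : List Char :=
  if PySem.Chars.isspace c then [' '] else if pvCatPS c then [] else [c]

def pvClean (w : List Char) : List Char := w.filter PySem.Chars.isalnum

-- clean recursion computing Python str.split() (spec for PySem.Chars.split₀)
def pvWords : List Char → List Char → List (List Char)
  | [], cur => if cur.isEmpty then [] else [cur]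
  | c :: rest, cur =>
      if PySem.Chars.isspace c then
        (if cur.isEmpty then pvWords rest [] else cur :: pvWords rest [])
      else pvWords rest (cur ++ [c])

-- clean recursion computing str.split(" ") (spec for PySem.Chars.splitOn · [' '])
def pvSplitSp : List Char → List Char → List (List Char)
  | [], cur => [cur]
  | c :: rest, cur => if c = ' ' then cur :: pvSplitSp rest [] else pvSplitSp rest (cur ++ [c])

lemma pv_split0_go (s : List Char) : ∀ cur acc,
    PySem.Chars.split₀.go s cur acc = acc.reverse ++ pvWords s cur.reverse := by
  induction s with
  | nil =>
      intro cur acc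
      by_cases h : cur.isEmpty <;> simp [PySem.Chars.split₀.go, pvWords, h]
  | cons c rest ih =>
      intro cur acc
      by_cases hs : PySem.Chars.isspace c
      · by_cases h : cur.isEmpty
        · simp [PySem.Chars.split₀.go, pvWords, hs, h, ih]
        · simp [PySem.Chars.split₀.go, pvWords, hs, h, ih]
      · simp [PySem.Chars.split₀.go, pvWords, hs, ih]

lemma pv_split0_eq (s : List Char) : PySem.Chars.split₀ s = pvWords s [] := by
  simp [PySem.Chars.split₀, pv_split0_go]

lemma pv_splitOn_go (s : List Char) : ∀ fuel cur acc, s.length < fuel →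
    PySem.Chars.splitOn.go [' '] fuel s cur acc = acc.reverse ++ pvSplitSp s cur.reverse := by
  induction s with
  | nil =>
      intro fuel cur acc hf
      cases fuel with
      | zero => omega
      | succ n => simp [PySem.Chars.splitOn.go, pvSplitSp]
  | cons c rest ih =>
      intro fuel cur acc hf
      cases fuel with
      | zero => omega
      | succ n =>
        by_cases hc : c = ' '
        · subst hc
          simp [PySem.Chars.splitOn.go, pvSplitSp, List.isPrefixOf, ih n,
            (by simp at hf; omega : rest.length < n)]
        · simp [PySem.Chars.splitOn.go, pvSplitSp, List.isPrefixOf, hc, Ne.symm hc,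
            ih n, (by simp at hf; omega : rest.length < n)]

lemma pv_splitOn_eq (s : List Char) :
    PySem.Chars.splitOn s [' '] = pvSplitSp s [] := by
  simp [PySem.Chars.splitOn, pv_splitOn_go s (s.length + 1) [] [] (by omega)]

lemma pv_splitSp_append (w : List Char) (hw : ' ' ∉ w) : ∀ l cur,
    pvSplitSp (w ++ l) cur = pvSplitSp l (cur ++ w) := by
  induction w with
  | nil => simp
  | cons c t ih =>
      intro l cur
      have hc : c ≠ ' ' := by intro h; exact hw (h ▸ List.mem_cons_self)
      have ht : ' ' ∉ t := fun h => hw (List.mem_cons_of_mem _ h)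
      simp [pvSplitSp, hc, ih ht, List.append_assoc]

-- str.split(" ") inverts " ".join on space-free words
lemma pv_roundtrip : ∀ ws : List (List Char), (∀ w ∈ ws, ' ' ∉ w) → ws ≠ [] →
    pvSplitSp (PySem.Chars.join [' '] ws) [] = ws := by
  intro ws
  induction ws with
  | nil => intro _ h; exact absurd rfl h
  | cons w t ih =>
      intro hws _
      have hw : ' ' ∉ w := hws w List.mem_cons_self
      cases t with
      | nil =>
          have h := pv_splitSp_append w hw [] []
          simp [pvSplitSp] at h
          simpa [PySem.Chars.join_singleton] using h
      | cons b t' =>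
          rw [PySem.Chars.join_cons_cons, List.append_assoc, pv_splitSp_append w hw]
          simp [pvSplitSp,
            ih (fun x hx => hws x (List.mem_cons_of_mem _ hx)) (by simp)]

lemma pv_char (c : Char) (hd : pvDomChar c = true) (hs : PySem.Chars.isspace c = false) :
    pvCatPS c = !PySem.Chars.isalnum c := by
  have h128 : c.toNat < 128 := by
    simp [pvDomChar] at hd
    omega
  have key : ∀ n, n < 128 → pvDomChar (Char.ofNat n) = true →
      PySem.Chars.isspace (Char.ofNat n) = false →
      pvCatPS (Char.ofNat n) = !PySem.Chars.isalnum (Char.ofNat n) := by decide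
  have hc := Char.ofNat_toNat c
  rw [← hc] at hd hs ⊢
  exact key _ h128 hd hs

lemma pv_M : ∀ (s : List Char), (∀ c ∈ s, pvDomChar c = true) → ∀ d : List Char,
    pvWords (s.flatMap pvF) (pvClean d) =
      ((pvWords s d).filter (fun w => !(pvClean w).isEmpty)).map pvClean := by
  intro s
  induction s with
  | nil =>
      intro _ d
      by_cases h : (pvClean d).isEmpty
      · cases d <;> simp [pvWords, pvClean] <;> simp_all [pvClean]
      · have hde : ¬ d.isEmpty = true := by
          intro hh; rw [List.isEmpty_iff.mp hh] at h; simp [pvClean] at h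
        simp [pvWords, h, hde]
  | cons c rest ih =>
      intro hd d
      have hdc : pvDomChar c = true := hd c List.mem_cons_self
      have hdr : ∀ x ∈ rest, pvDomChar x = true := fun x hx => hd x (List.mem_cons_of_mem _ hx)
      by_cases hs : PySem.Chars.isspace c
      · have hsp : PySem.Chars.isspace ' ' = true := by decide
        have ihnil := ih hdr []
        rw [show pvClean [] = [] from rfl] at ihnil
        by_cases hde : d.isEmpty
        · simp [pvF, hs, pvWords, hsp, List.isEmpty_iff.mp hde, pvClean, ihnil]
        · by_cases hce : (pvClean d).isEmpty
          · simp [pvF, hs, pvWords, hsp, hde, hce, ihnil]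
          · simp [pvF, hs, pvWords, hsp, hde, hce, ihnil]
      · have hs' : PySem.Chars.isspace c = false := by simp [hs]
        have hclean : ∀ d : List Char, pvClean (d ++ [c]) =
            pvClean d ++ (if PySem.Chars.isalnum c then [c] else []) := by
          intro d; by_cases h : PySem.Chars.isalnum c <;> simp [pvClean, List.filter_append, h]
        by_cases ha : PySem.Chars.isalnum c
        · have hps : pvCatPS c = false := by rw [pv_char c hdc hs']; simp [ha]
          have key := ih hdr (d ++ [c])
          rw [hclean d, if_pos ha] at key
          simpa [pvF, hs, hps, pvWords] using key
        · have hps : pvCatPS c = true := by rw [pv_char c hdc hs']; simp [ha]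
          have key := ih hdr (d ++ [c])
          rw [hclean d] at key
          simp only [if_neg ha, List.append_nil] at key
          simpa [pvF, hs, hps, pvWords] using key

-- every element of B's word list is non-empty and space-free
lemma pv_cws_mem (s : List Char) (w : List Char)
    (hw : w ∈ ((pvWords s []).filter (fun w => !(pvClean w).isEmpty)).map pvClean) :
    w ≠ [] ∧ ' ' ∉ w := by
  rcases List.mem_map.mp hw with ⟨x, hx, rfl⟩
  have hp := (List.mem_filter.mp hx).2
  constructor
  · intro h; rw [h] at hp; simp at hp
  · intro h
    have := List.mem_filter.mp (show ' ' ∈ pvClean x from h) |>.2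
    simp [PySem.Chars.isalnum, PySem.Chars.isalpha, PySem.Chars.isdigit,
      PySem.Chars.isupper, PySem.Chars.islower] at this

lemma pv_join_ne_nil (ws : List (List Char)) (h : ∀ w ∈ ws, w ≠ []) (hne : ws ≠ []) :
    PySem.Chars.join [' '] ws ≠ [] := by
  cases ws with
  | nil => exact absurd rfl hne
  | cons w t =>
      have hw := h w List.mem_cons_self
      cases t with
      | nil => simpa [PySem.Chars.join_singleton] using hw
      | cons b t' =>
          rw [PySem.Chars.join_cons_cons]
          simp [hw]

theorem pv_main (s : List Char) (hd : ∀ c ∈ s, pvDomChar c = true) :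
    (let cleaned := PySem.Chars.join [' '] (PySem.Chars.split₀ (s.foldl
      (fun acc ch =>
        if PySem.Chars.isspace ch then acc ++ [' ']
        else if pvCatPS ch then acc
        else acc ++ [ch]) []));
     if cleaned.isEmpty then ""
     else
       let words := PySem.Chars.splitOn cleaned [' ']
       if words.length > 10 then String.ofList (PySem.Chars.join [' '] (PySem.List.slice words none (some 10)))
       else String.ofList cleaned) =
    String.ofList (PySem.Chars.join [' '] (PySem.List.slice ((PySem.Chars.split₀ s).foldl
      (fun acc tok =>
        let w := tok.filter PySem.Chars.isalnum
        if w.isEmpty then acc else acc ++ [w]) []) none (some 10))) := by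
  have hA : (fun (acc : List Char) ch =>
      if PySem.Chars.isspace ch then acc ++ [' ']
      else if pvCatPS ch then acc
      else acc ++ [ch]) = fun acc ch => acc ++ pvF ch := by
    funext acc ch
    simp only [pvF]
    split_ifs <;> simp
  have hB : (fun (acc : List (List Char)) tok =>
      let w := tok.filter PySem.Chars.isalnum
      if w.isEmpty then acc else acc ++ [w]) =
      fun acc tok => if (!(pvClean tok).isEmpty) = true then acc ++ [pvClean tok] else acc := by
    funext acc tok
    simp only [pvClean]
    by_cases h : (List.filter PySem.Chars.isalnum tok).isEmpty
    · simp [h]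
    · simp [h]
  rw [hA, hB, PySem.List.foldl_append_eq_flatMap, PySem.List.foldl_append_if]
  set cws := ((pvWords s []).filter (fun w => !(pvClean w).isEmpty)).map pvClean with hcws
  have h1 : PySem.Chars.split₀ (List.flatMap pvF s) = cws := by
    rw [pv_split0_eq]
    have := pv_M s hd []
    rw [show pvClean [] = [] from rfl] at this
    exact this
  have h2 : List.map pvClean (List.filter (fun w => !(pvClean w).isEmpty)
      (PySem.Chars.split₀ s)) = cws := by rw [pv_split0_eq]
  simp only [List.nil_append]
  rw [h1, h2]
  have hsl : ∀ xs : List (List Char), PySem.List.slice xs none (some 10) = List.take 10 xs := by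
    intro xs
    rw [PySem.List.slice_to _ (by norm_num), show Int.toNat 10 = 10 from rfl]
  simp only [hsl]
  cases hc : cws with
  | nil => simp [PySem.Chars.join_nil]
  | cons w t =>
      rw [← hc]
      have hmem : ∀ x ∈ cws, x ≠ [] ∧ ' ' ∉ x := fun x hx => pv_cws_mem s x (hcws ▸ hx)
      have hne : PySem.Chars.join [' '] cws ≠ [] :=
        pv_join_ne_nil cws (fun x hx => (hmem x hx).1) (by rw [hc]; simp)
      rw [if_neg (by simpa using hne)]
      have hrt : PySem.Chars.splitOn (PySem.Chars.join [' '] cws) [' '] = cws := by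
        rw [pv_splitOn_eq]
        exact pv_roundtrip cws (fun x hx => (hmem x hx).2) (by rw [hc]; simp)
      rw [hrt]
      by_cases hlen : cws.length > 10
      · rw [if_pos hlen]
      · rw [if_neg hlen, List.take_of_length_le (by omega)]

-- domain propagation through the preprocessing
lemma pv_dom_replace_go (old new : List Char) (hn : ∀ c ∈ new, pvDomChar c = true) :
    ∀ (fuel : Nat) (l acc : List Char), (∀ c ∈ l, pvDomChar c = true) →
      (∀ c ∈ acc, pvDomChar c = true) →
      ∀ c ∈ PySem.Chars.replace.go old new fuel l acc, pvDomChar c = true := by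
  intro fuel
  induction fuel with
  | zero =>
      intro l acc hl ha c hc
      simp [PySem.Chars.replace.go] at hc
      rcases hc with h | h
      · exact ha c h
      · exact hl c h
  | succ n ih =>
      intro l acc hl ha c hc
      cases l with
      | nil =>
          simp [PySem.Chars.replace.go] at hc
          exact ha c hc
      | cons x t =>
          by_cases hp : old.isPrefixOf (x :: t)
          · rw [show PySem.Chars.replace.go old new (n+1) (x :: t) acc =
                PySem.Chars.replace.go old new n (List.drop old.length (x :: t))
                  (new.reverse ++ acc) by simp [PySem.Chars.replace.go, hp]] at hc
            exact ih _ _ (fun d hd => hl d (List.drop_subset _ _ hd))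
              (fun d hd => by
                rcases List.mem_append.mp hd with h | h
                · exact hn d (List.mem_reverse.mp h)
                · exact ha d h) c hc
          · rw [show PySem.Chars.replace.go old new (n+1) (x :: t) acc =
                PySem.Chars.replace.go old new n t (x :: acc) by
                  simp [PySem.Chars.replace.go, hp]] at hc
            exact ih _ _ (fun d hd => hl d (List.mem_cons_of_mem _ hd))
              (fun d hd => by
                rcases List.mem_cons.mp hd with rfl | h
                · exact hl d List.mem_cons_self
                · exact ha d h) c hc

lemma pv_dom_replace (s old new : List Char) (hs : ∀ c ∈ s, pvDomChar c = true)
    (hn : ∀ c ∈ new, pvDomChar c = true) :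
    ∀ c ∈ PySem.Chars.replace s old new, pvDomChar c = true := by
  intro c hc
  unfold PySem.Chars.replace at hc
  by_cases he : old.isEmpty
  · rw [if_pos he] at hc
    rcases List.mem_append.mp hc with h | h
    · exact hn c h
    · rcases List.mem_flatMap.mp h with ⟨x, hx, hcx⟩
      rcases List.mem_cons.mp hcx with rfl | h'
      · exact hs c hx
      · exact hn c h'
  · rw [if_neg he] at hc
    exact pv_dom_replace_go old new hn _ _ _ hs (by simp) c hc

lemma pv_dom_strip (s : List Char) (hs : ∀ c ∈ s, pvDomChar c = true) :
    ∀ c ∈ PySem.Chars.strip s, pvDomChar c = true := by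
  intro c hc
  unfold PySem.Chars.strip PySem.Chars.rstrip PySem.Chars.lstrip at hc
  exact hs c (by
    have h1 := (List.dropWhile_sublist (l := (List.dropWhile PySem.Chars.isspace s).reverse)
      PySem.Chars.isspace).subset (List.mem_reverse.mp hc)
    exact (List.dropWhile_sublist PySem.Chars.isspace).subset (List.mem_reverse.mp h1))

lemma pv_dom_prep (text : String) (h : Dom_sanitize_title_py text) :
    ∀ c ∈ (PySem.Str.replace (PySem.Str.replace
        (PySem.Str.strip (PySem.Str.replace (PySem.Str.replace text "\r" " ") "\n" " "))
        "\"" "") "'" "").toList, pvDomChar c = true := by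
  have h0 : ∀ c ∈ text.toList, pvDomChar c = true := by
    unfold Dom_sanitize_title_py pvDomStr at h
    exact fun c hc => List.all_eq_true.mp h c hc
  have hsp : ∀ c ∈ (" " : String).toList, pvDomChar c = true := by
    intro c hc
    rw [show (" " : String).toList = [' '] from rfl] at hc
    simp at hc
    subst hc
    decide
  have hnil : ∀ c ∈ ("" : String).toList, pvDomChar c = true := by
    intro c hc
    rw [show ("" : String).toList = [] from rfl] at hc
    simp at hc
  simp only [PySem.Str.toList_replace, PySem.Str.toList_strip]
  exact pv_dom_replace _ _ _ (pv_dom_replace _ _ _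
    (pv_dom_strip _ (pv_dom_replace _ _ _ (pv_dom_replace _ _ _ h0 hsp) hsp)) hnil) hnil

-- ===== VERDICT (by name: the statement is the Claim_ definition above) =====
theorem sanitize_title_py_spec : Claim_equal_sanitize_title_py := by
  intro text hdom
  unfold Spec_sanitize_title_py sanitize_title_py sanitize_title_py_alt
  exact pv_main _ (pv_dom_prep text hdom)
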